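-- pv_equiv track=rewrite | github.com/jecki/DHParser | examples/re/reParser.py | inCharSet
-- ===== SOURCE A (Python) =====
-- def inCharSet(l: str, k: int) -> bool:
--     i = 0
--     state = 'neutral'
--     while i < k:
--         if state == 'escaped':
--             state = 'neutral'
--         elif l[i] == '\\':
--             state = 'escaped'
--         elif l[i] == '[':
--             state = 'inset'
--         elif l[i] == ']':
--             state = 'neutral'
--         i += 1
--     return state == 'inset'
-- ===== SOURCE B (Python) =====
-- def inCharSet(l: str, k: int) -> bool:
--     # Backward scan: the answer is decided entirely by the last backslash or
--     # bracket before position k; a '[' opens a set only when preceded by an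
--     # even run of backslashes.
--     j = k - 1
--     while j >= 0:
--         c = l[j]
--         if c in '\\[]':
--             if c != '[':
--                 return False
--             n = 0
--             while j - 1 - n >= 0 and l[j - 1 - n] == '\\':
--                 n += 1
--             return n % 2 == 0
--         j -= 1
--     return False
-- ===== Notes on version B (the rewrite author's own statement) =====
-- stated objective: alternative
-- what changed: Replaces the forward three-state escape machine by a backward scan that stops at the last backslash/bracket before k and decides by the parity of the backslash run preceding it; Pre_ excludes k > len(l), where A raises IndexError except in the accidental case k = len(l)+1 after an odd trailing backslash run (A's escaped-state step skips the final read), where B's backward scan itself raises.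
-- outside the precondition, e.g. on inCharSet('\\', 2): A returns False, B raises IndexError
import Mathlib
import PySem

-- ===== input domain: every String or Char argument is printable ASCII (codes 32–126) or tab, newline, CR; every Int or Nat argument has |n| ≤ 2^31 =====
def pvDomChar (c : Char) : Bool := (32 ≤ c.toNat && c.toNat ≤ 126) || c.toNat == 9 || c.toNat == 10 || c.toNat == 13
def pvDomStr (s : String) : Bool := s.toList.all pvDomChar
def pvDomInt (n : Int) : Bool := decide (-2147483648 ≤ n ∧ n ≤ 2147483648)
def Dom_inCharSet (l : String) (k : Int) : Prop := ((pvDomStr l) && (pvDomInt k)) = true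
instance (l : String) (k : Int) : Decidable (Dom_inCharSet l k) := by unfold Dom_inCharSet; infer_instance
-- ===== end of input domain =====

-- B scans BACKWARD from k-1 to the last backslash/bracket and decides by backslash-run
-- parity instead of running A's forward three-state machine; objective: alternative.

-- ===== PORT A =====
-- A's while-loop; i increments by 1 each iteration, so the loop runs exactly max(k,0)
-- iterations: fuel = k - i counts the remaining ones. Out-of-range l[i] (IndexError in
-- Python) is rendered by getD; Pre_inCharSet below excludes all such inputs.
def inCharSetGo (cs : List Char) : Nat → Nat → String → String
  | 0, _, state => state
  | fuel + 1, i, state =>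
      inCharSetGo cs fuel (i + 1)
        (if state = "escaped" then "neutral"
         else if cs.getD i ' ' = '\\' then "escaped"
         else if cs.getD i ' ' = '[' then "inset"
         else if cs.getD i ' ' = ']' then "neutral"
         else state)

def inCharSet (l : String) (k : Int) : Bool :=
  decide (inCharSetGo l.toList k.toNat 0 "neutral" = "inset")

-- ===== PORT B =====
-- B's inner while-loop: length of the run of consecutive backslashes at positions
-- j-1, j-2, … (the loop counter n reaches exactly this value).
def altRun (cs : List Char) : Nat → Nat
  | 0 => 0
  | m + 1 => if cs.getD m ' ' = '\\' then altRun cs m + 1 else 0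

-- B's outer while-loop, j running downward from k-1; argument j+1 stands for index j.
def altGo (cs : List Char) : Nat → Bool
  | 0 => false
  | j + 1 =>
      let c := cs.getD j ' '
      if c = '\\' ∨ c = '[' ∨ c = ']' then
        if c ≠ '[' then false
        else decide (altRun cs j % 2 = 0)
      else altGo cs j

def inCharSet_alt (l : String) (k : Int) : Bool := altGo l.toList k.toNat

-- ===== PRECONDITION & SPEC =====
-- Pre_ excludes k > len(l): there Python raises IndexError — A on its forward read l[i]
-- (except the accidental case k = len(l)+1 reached in escaped state, where A returns
-- False, see claim.json's cite), B on its backward read l[k-1].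
def Pre_inCharSet (l : String) (k : Int) : Prop := k ≤ (l.toList.length : Int)
instance (l : String) (k : Int) : Decidable (Pre_inCharSet l k) := by
  unfold Pre_inCharSet; infer_instance

def pvWitness_inCharSet : String × Int := ("[a", 2)

def Spec_inCharSet (l : String) (k : Int) (out : Bool) : Prop := out = inCharSet_alt l k
instance (l : String) (k : Int) (out : Bool) : Decidable (Spec_inCharSet l k out) := by
  unfold Spec_inCharSet; infer_instance

-- ===== CLAIM (what is proved, stated in full; the proofs are below) =====
def Claim_equal_inCharSet : Prop :=
  ∀ (l : String) (k : Int), Dom_inCharSet l k → Pre_inCharSet l k →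
    Spec_inCharSet l k (inCharSet l k)

-- ===== LEMMAS AND PROOFS =====

-- One step of A's machine, factored out for the snoc lemma.
def stepA (st : String) (c : Char) : String :=
  if st = "escaped" then "neutral"
  else if c = '\\' then "escaped"
  else if c = '[' then "inset"
  else if c = ']' then "neutral"
  else st

-- Peeling the LAST iteration off A's loop instead of the first.
lemma go_snoc (cs : List Char) :
    ∀ fuel i st, inCharSetGo cs (fuel + 1) i st
      = stepA (inCharSetGo cs fuel i st) (cs.getD (i + fuel) ' ') := by
  intro fuel
  induction fuel with
  | zero => intro i st; simp [inCharSetGo, stepA]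
  | succ f ih =>
      intro i st
      have h1 : inCharSetGo cs (f + 1 + 1) i st
          = inCharSetGo cs (f + 1) (i + 1)
            (if st = "escaped" then "neutral"
             else if cs.getD i ' ' = '\\' then "escaped"
             else if cs.getD i ' ' = '[' then "inset"
             else if cs.getD i ' ' = ']' then "neutral"
             else st) := rfl
      have h2 : inCharSetGo cs (f + 1) i st
          = inCharSetGo cs f (i + 1)
            (if st = "escaped" then "neutral"
             else if cs.getD i ' ' = '\\' then "escaped"
             else if cs.getD i ' ' = '[' then "inset"
             else if cs.getD i ' ' = ']' then "neutral"
             else st) := rfl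
      rw [h1, ih, h2, show i + 1 + f = i + (f + 1) from by omega]

-- The invariant tying A's forward state to B's backward characterisation:
-- the state after n steps is "escaped" iff the backslash run ending at n-1 is odd,
-- it is "inset" iff B's backward scan from n says so, and it is one of the three strings.
lemma main_inv (cs : List Char) :
    ∀ n,
      ((inCharSetGo cs n 0 "neutral" = "escaped") ↔ altRun cs n % 2 = 1) ∧
      (decide (inCharSetGo cs n 0 "neutral" = "inset") = altGo cs n) ∧
      (inCharSetGo cs n 0 "neutral" = "neutral" ∨
         inCharSetGo cs n 0 "neutral" = "escaped" ∨
         inCharSetGo cs n 0 "neutral" = "inset") := by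
  intro n
  induction n with
  | zero => simp [inCharSetGo, altRun, altGo]
  | succ n ih =>
      obtain ⟨hesc, hins, htri⟩ := ih
      have hsnoc : inCharSetGo cs (n + 1) 0 "neutral"
          = stepA (inCharSetGo cs n 0 "neutral") (cs.getD n ' ') := by
        simpa using go_snoc cs n 0 "neutral"
      rw [hsnoc]
      simp only [altRun, altGo]
      set s := inCharSetGo cs n 0 "neutral" with hs
      set c := cs.getD n ' ' with hc0
      clear_value s c
      by_cases hb : c = '\\'
      · subst hb
        by_cases he : s = "escaped"
        · have hodd : altRun cs n % 2 = 1 := hesc.mp he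
          refine ⟨?_, ?_, ?_⟩ <;> simp [stepA, he] <;> omega
        · have heven : altRun cs n % 2 = 0 := by
            rcases Nat.mod_two_eq_zero_or_one (altRun cs n) with h | h
            · exact h
            · exact absurd (hesc.mpr h) he
          refine ⟨?_, ?_, ?_⟩ <;> simp [stepA, he] <;> omega
      · by_cases ho : c = '['
        · subst ho
          by_cases he : s = "escaped"
          · have hodd : altRun cs n % 2 = 1 := hesc.mp he
            have hne : ¬ altRun cs n % 2 = 0 := by omega
            refine ⟨?_, ?_, ?_⟩ <;> simp [stepA, he, hne]
          · have heven : altRun cs n % 2 = 0 := by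
              rcases Nat.mod_two_eq_zero_or_one (altRun cs n) with h | h
              · exact h
              · exact absurd (hesc.mpr h) he
            refine ⟨?_, ?_, ?_⟩ <;> simp [stepA, he, heven]
        · by_cases hcl : c = ']'
          · subst hcl
            by_cases he : s = "escaped"
            · refine ⟨?_, ?_, ?_⟩ <;> simp [stepA, he]
            · refine ⟨?_, ?_, ?_⟩ <;> simp [stepA, he]
          · by_cases he : s = "escaped"
            · refine ⟨?_, ?_, ?_⟩
              · simp [stepA, he, hb, ho, hcl]
              · simp only [stepA, he, hb, ho, hcl, or_self, if_false]
                rw [← hins]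
                simp [he]
              · simp [stepA, he, hb, ho, hcl]
            · refine ⟨?_, ?_, ?_⟩
              · simp [stepA, he, hb, ho, hcl]
              · simp only [stepA, he, hb, ho, hcl, or_self, if_false]
                exact hins
              · simp only [stepA, hb, ho, hcl, if_false, if_neg he]
                exact htri

-- ===== VERDICT (by name: the statement is the Claim_ definition above) =====
theorem inCharSet_spec : Claim_equal_inCharSet := by
  intro l k _ _
  unfold Spec_inCharSet inCharSet inCharSet_alt
  exact (main_inv l.toList k.toNat).2.1
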